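-- pv_equiv track=rewrite | github.com/amruta-11/learning-python | CodingBat/MakeChocolate.py | make_chocolate
-- ===== SOURCE A (Python) =====
-- def make_chocolate(small, big, goal):
--
--   while(big * 5 > goal):
--     big = big - 1
--
--   maxchoco = small + big * 5
--
--   if maxchoco >= goal:
--     extra = maxchoco - goal
--     used = (small - extra)
--     return used
--   else:
--     return -1
-- ===== SOURCE B (Python) =====
-- def make_chocolate(small, big, goal):
--     used_big = min(big, goal // 5)
--     rem = goal - 5 * used_big
--     return rem if rem <= small else -1
-- ===== Notes on version B (the rewrite author's own statement) =====
-- stated objective: faster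
-- what changed: replaces the decrement-until-fit while loop with a closed-form floor division min(big, goal//5)
import Mathlib
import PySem

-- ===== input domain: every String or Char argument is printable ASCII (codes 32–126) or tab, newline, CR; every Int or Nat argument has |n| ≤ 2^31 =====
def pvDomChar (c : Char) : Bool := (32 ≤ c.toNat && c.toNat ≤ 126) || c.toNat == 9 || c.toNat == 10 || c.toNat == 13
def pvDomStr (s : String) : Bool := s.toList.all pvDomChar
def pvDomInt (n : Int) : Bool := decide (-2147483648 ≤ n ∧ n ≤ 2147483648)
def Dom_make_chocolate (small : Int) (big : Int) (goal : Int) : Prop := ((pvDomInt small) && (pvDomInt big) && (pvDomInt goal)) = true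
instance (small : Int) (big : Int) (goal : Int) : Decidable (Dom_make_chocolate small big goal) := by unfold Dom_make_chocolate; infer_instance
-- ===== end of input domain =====

-- B replaces A's decrement-until-fit while loop with a closed-form min(big, goal//5): O(1) instead of O(big - goal/5).


-- ===== PORT A =====
-- the while loop: decrement big while big * 5 > goal
def makeChocLoop (big : Int) (goal : Int) : Int :=
  if big * 5 > goal then makeChocLoop (big - 1) goal else big
termination_by (big * 5 - goal).toNat
decreasing_by omega

def make_chocolate (small : Int) (big : Int) (goal : Int) : Int :=
  let big' := makeChocLoop big goal
  let maxchoco := small + big' * 5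
  if maxchoco ≥ goal then
    let extra := maxchoco - goal
    let used := small - extra
    used
  else
    -1

-- ===== PORT B =====
def make_chocolate_alt (small : Int) (big : Int) (goal : Int) : Int :=
  let used_big := min big (PySem.Int.floordiv goal 5)
  let rem := goal - 5 * used_big
  if rem ≤ small then rem else -1

-- ===== PRECONDITION & SPEC =====
def Spec_make_chocolate (small : Int) (big : Int) (goal : Int) (out : Int) : Prop := out = make_chocolate_alt small big goal
instance (small : Int) (big : Int) (goal : Int) (out : Int) : Decidable (Spec_make_chocolate small big goal out) := by unfold Spec_make_chocolate; infer_instance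

-- ===== CLAIM (what is proved, stated in full; the proofs are below) =====
def Claim_equal_make_chocolate : Prop := ∀ (small : Int) (big : Int) (goal : Int), Dom_make_chocolate small big goal → Spec_make_chocolate small big goal (make_chocolate small big goal)

-- ===== LEMMAS AND PROOFS =====
theorem makeChocLoop_eq (big goal : Int) : makeChocLoop big goal = min big (PySem.Int.floordiv goal 5) := by
  fun_induction makeChocLoop big goal with
  | case1 b hgt ih =>
    rw [ih]
    have h5 : (0:Int) < 5 := by norm_num
    have := (PySem.Int.le_floordiv_iff_mul_le (a := goal) (b := 5) (q := b) h5)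
    omega
  | case2 b hle =>
    have h5 : (0:Int) < 5 := by norm_num
    have := (PySem.Int.le_floordiv_iff_mul_le (a := goal) (b := 5) (q := b) h5)
    omega

-- ===== VERDICT (by name: the statement is the Claim_ definition above) =====
theorem make_chocolate_spec : Claim_equal_make_chocolate := by
  intro small big goal _
  unfold Spec_make_chocolate make_chocolate make_chocolate_alt
  rw [makeChocLoop_eq]
  simp only []
  split_ifs with h1 h2 h2 <;> omega
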